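-- pv_equiv track=rewrite | github.com/hghyhghy/Codechef-Coding-Ninja | T52/1.py | possible_combinations
-- ===== SOURCE A (Python) =====
-- def possible_combinations(pants,shirts,shoes,skirts,price):
--
--     valid_combination= 0
--
--     for pant in pants:
--
--         for shirt in shirts:
--
--             for shoe in shoes:
--
--                 for skirt in skirts:
--
--                     total_price=  pant+shirt+shoe+skirt
--
--                     if total_price <= price:
--
--                         valid_combination += 1
--
--
--
--     return valid_combination
-- ===== SOURCE B (Python) =====
-- def possible_combinations(pants, shirts, shoes, skirts, price):
--     # Pair up shoes+skirts once, sort the pair sums, then for each pant+shirt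
--     # budget count the fitting pair sums with a hand-written binary search.
--     cd = sorted(c + k for c in shoes for k in skirts)
--     n = len(cd)
--     total = 0
--     for p in pants:
--         for sh in shirts:
--             x = price - p - sh
--             lo, hi = 0, n
--             while lo < hi:
--                 mid = (lo + hi) // 2
--                 if cd[mid] <= x:
--                     lo = mid + 1
--                 else:
--                     hi = mid
--             total += lo
--     return total
-- ===== Notes on version B (the rewrite author's own statement) =====
-- stated objective: faster
-- what changed: Replaces the quadruple nested loop by precomputing the sorted list of shoe+skirt pair sums and, for each pant+shirt pair, counting the fitting pair sums with a binary search.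
import Mathlib
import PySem

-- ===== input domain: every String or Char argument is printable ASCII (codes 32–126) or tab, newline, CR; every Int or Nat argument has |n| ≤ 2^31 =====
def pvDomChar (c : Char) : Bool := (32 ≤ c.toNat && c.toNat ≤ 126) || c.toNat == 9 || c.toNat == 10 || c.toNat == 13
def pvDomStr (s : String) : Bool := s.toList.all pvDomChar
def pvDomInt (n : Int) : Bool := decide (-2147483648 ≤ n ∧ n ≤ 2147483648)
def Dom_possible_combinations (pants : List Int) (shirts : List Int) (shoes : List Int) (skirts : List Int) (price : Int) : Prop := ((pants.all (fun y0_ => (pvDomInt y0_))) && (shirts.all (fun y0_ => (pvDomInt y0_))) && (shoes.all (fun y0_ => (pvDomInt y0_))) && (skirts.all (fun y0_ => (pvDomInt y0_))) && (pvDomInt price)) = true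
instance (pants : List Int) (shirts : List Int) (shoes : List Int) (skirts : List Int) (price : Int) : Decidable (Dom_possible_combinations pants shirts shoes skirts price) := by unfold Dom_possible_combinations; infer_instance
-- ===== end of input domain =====

-- B replaces A's quadruple nested loop by sorting the shoe+skirt pair sums once and
-- binary-searching a count for each pant+shirt pair (asymptotically faster).

-- ===== PORT A =====
def possible_combinations (pants : List Int) (shirts : List Int) (shoes : List Int) (skirts : List Int) (price : Int) : Int :=
  pants.foldl (fun acc pant =>
    shirts.foldl (fun acc shirt =>
      shoes.foldl (fun acc shoe =>
        skirts.foldl (fun acc skirt =>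
          if pant + shirt + shoe + skirt ≤ price then acc + 1 else acc) acc) acc) acc) 0

-- ===== PORT B =====
-- the `while lo < hi` binary-search loop of Source B; lo, hi are the nonnegative Python
-- ints, so Nat `/ 2` is exactly Python's `(lo + hi) // 2`; cd[mid] is always in range
-- here (lo ≤ mid < hi ≤ len(cd)), so `getD mid 0` is exact where the loop reads it
def pvBsearchGo (cd : List Int) (x : Int) : Nat → Nat → Nat → Nat
  | 0, lo, _ => lo
  | fuel + 1, lo, hi =>
    if lo < hi then
      let mid := (lo + hi) / 2
      if cd.getD mid 0 ≤ x then pvBsearchGo cd x fuel (mid + 1) hi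
      else pvBsearchGo cd x fuel lo mid
    else lo

-- fuel hi - lo is enough: each iteration shrinks hi - lo by at least one
def pvBsearch (cd : List Int) (x : Int) (lo hi : Nat) : Nat :=
  pvBsearchGo cd x (hi - lo) lo hi

def possible_combinations_alt (pants : List Int) (shirts : List Int) (shoes : List Int) (skirts : List Int) (price : Int) : Int :=
  let cd := PySem.List.sorted (shoes.flatMap (fun c => skirts.map (fun k => c + k))) (fun v => v) false
  let n := cd.length
  pants.foldl (fun acc p =>
    shirts.foldl (fun acc sh =>
      acc + (pvBsearch cd (price - p - sh) 0 n : Int)) acc) 0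

-- ===== PRECONDITION & SPEC =====
def Spec_possible_combinations (pants : List Int) (shirts : List Int) (shoes : List Int) (skirts : List Int) (price : Int) (out : Int) : Prop := out = possible_combinations_alt pants shirts shoes skirts price
instance (pants : List Int) (shirts : List Int) (shoes : List Int) (skirts : List Int) (price : Int) (out : Int) : Decidable (Spec_possible_combinations pants shirts shoes skirts price out) := by unfold Spec_possible_combinations; infer_instance

-- ===== CLAIM (what is proved, stated in full; the proofs are below) =====
def Claim_equal_possible_combinations : Prop := ∀ (pants : List Int) (shirts : List Int) (shoes : List Int) (skirts : List Int) (price : Int), Dom_possible_combinations pants shirts shoes skirts price → Spec_possible_combinations pants shirts shoes skirts price (possible_combinations pants shirts shoes skirts price)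

-- ===== LEMMAS AND PROOFS =====

-- On a ≤-sorted list, an element is ≤ x exactly when its index is below countP (· ≤ x)
lemma sorted_le_iff_lt_countP (cd : List Int) (x : Int)
    (h : cd.Pairwise (fun a b => a ≤ b)) (j : Nat) (hj : j < cd.length) :
    cd[j] ≤ x ↔ j < cd.countP (fun v => decide (v ≤ x)) := by
  rw [List.pairwise_iff_getElem] at h
  constructor
  · intro hle
    have hsplit := List.take_append_drop (j + 1) cd
    have : cd.countP (fun v => decide (v ≤ x)) =
        (cd.take (j + 1)).countP (fun v => decide (v ≤ x)) +
        (cd.drop (j + 1)).countP (fun v => decide (v ≤ x)) := by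
      conv_lhs => rw [← hsplit]
      rw [List.countP_append]
    have htake : (cd.take (j + 1)).countP (fun v => decide (v ≤ x)) = j + 1 := by
      have hall : ∀ a ∈ cd.take (j + 1), (fun v => decide (v ≤ x)) a = true := by
        intro a ha
        obtain ⟨i, hi, rfl⟩ := List.mem_iff_getElem.mp ha
        have hil : i < cd.length := by
          have := List.length_take_le (j + 1) cd; omega
        have hij : i ≤ j := by
          have := hi; simp [List.length_take] at this; omega
        rw [List.getElem_take]
        rcases Nat.lt_or_ge i j with hlt | hge
        · exact decide_eq_true (le_trans (h i j hil hj hlt) hle)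
        · have : i = j := by omega
          subst this; exact decide_eq_true hle
      rw [List.countP_eq_length.mpr hall, List.length_take]
      omega
    omega
  · intro hlt
    by_contra hnle
    rw [not_le] at hnle
    have hsplit : cd.countP (fun v => decide (v ≤ x)) =
        (cd.take j).countP (fun v => decide (v ≤ x)) +
        (cd.drop j).countP (fun v => decide (v ≤ x)) := by
      conv_lhs => rw [← List.take_append_drop j cd]
      rw [List.countP_append]
    have hdrop : (cd.drop j).countP (fun v => decide (v ≤ x)) = 0 := by
      rw [List.countP_eq_zero]
      intro a ha
      obtain ⟨i, hi, rfl⟩ := List.mem_iff_getElem.mp ha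
      have hjl : j + i < cd.length := by simp [List.length_drop] at hi; omega
      have hel : (cd.drop j)[i] = cd[j + i] := by simp [List.getElem_drop]
      rw [hel]
      simp only [decide_eq_true_eq, not_le]
      have hmono : cd[j] ≤ cd[j + i] := by
        rcases Nat.eq_zero_or_pos i with hz | hp
        · subst hz; rfl
        · exact h j (j + i) hj hjl (by omega)
      exact lt_of_lt_of_le hnle hmono
    have htake : (cd.take j).countP (fun v => decide (v ≤ x)) ≤ j := by
      calc (cd.take j).countP (fun v => decide (v ≤ x)) ≤ (cd.take j).length := List.countP_le_length
        _ ≤ j := by simp [List.length_take]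
    omega

-- the binary search computes countP (· ≤ x) whenever the invariant lo ≤ C ≤ hi ≤ len holds
lemma pvBsearchGo_eq_countP (cd : List Int) (x : Int)
    (h : cd.Pairwise (fun a b => a ≤ b)) :
    ∀ n lo hi, hi - lo ≤ n → hi ≤ cd.length →
      lo ≤ cd.countP (fun v => decide (v ≤ x)) →
      cd.countP (fun v => decide (v ≤ x)) ≤ hi →
      pvBsearchGo cd x n lo hi = cd.countP (fun v => decide (v ≤ x)) := by
  intro n
  induction n with
  | zero =>
    intro lo hi hn hlen hlo hhi
    simp [pvBsearchGo]; omega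
  | succ m ih =>
    intro lo hi hn hlen hlo hhi
    rw [pvBsearchGo]
    by_cases hlt : lo < hi
    · simp only [hlt, if_pos]
      have hmidlo : lo ≤ (lo + hi) / 2 := by omega
      have hmidhi : (lo + hi) / 2 < hi := by omega
      have hmidlen : (lo + hi) / 2 < cd.length := by omega
      rw [List.getD_eq_getElem cd 0 hmidlen]
      by_cases hle : cd[(lo + hi) / 2] ≤ x
      · simp only [hle, if_pos]
        have hC : (lo + hi) / 2 < cd.countP (fun v => decide (v ≤ x)) :=
          (sorted_le_iff_lt_countP cd x h _ hmidlen).mp hle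
        exact ih ((lo + hi) / 2 + 1) hi (by omega) hlen (by omega) hhi
      · rw [if_neg hle]
        have hC : ¬ (lo + hi) / 2 < cd.countP (fun v => decide (v ≤ x)) := by
          intro hc
          exact hle ((sorted_le_iff_lt_countP cd x h _ hmidlen).mpr hc)
        exact ih lo ((lo + hi) / 2) (by omega) (by omega) hlo (by omega)
    · simp [hlt]; omega

lemma pvBsearch_eq_countP (cd : List Int) (x : Int)
    (h : cd.Pairwise (fun a b => a ≤ b)) :
    pvBsearch cd x 0 cd.length = cd.countP (fun v => decide (v ≤ x)) :=
  pvBsearchGo_eq_countP cd x h cd.length 0 cd.length (by omega) (le_refl _)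
    (by omega) List.countP_le_length

-- counting pair sums ≤ x over the flatMap equals the shoes-indexed sum of inner counts
lemma countP_flatMap_sum (shoes skirts : List Int) (x : Int) :
    ((shoes.flatMap (fun c => skirts.map (fun k => c + k))).countP (fun v => decide (v ≤ x)))
      = (shoes.map (fun c => skirts.countP (fun k => decide (c + k ≤ x)))).sum := by
  induction shoes with
  | nil => simp
  | cons c rest ih =>
    simp only [List.flatMap_cons, List.countP_append, List.map_cons, List.sum_cons, ih,
      List.countP_map]
    rfl

-- A's innermost loop as a countP (condition parenthesised exactly as in the port)
lemma inner_count (skirts : List Int) (t price : Int) (a : Int) :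
    skirts.foldl (fun acc skirt => if t + skirt ≤ price then acc + 1 else acc) a
      = a + (skirts.countP (fun k => decide (t + k ≤ price)) : Int) := by
  simpa using PySem.List.foldl_count_if (fun k => decide (t + k ≤ price)) skirts a

-- per pant+shirt pair: the binary search over the sorted pair sums = A's two inner loops
lemma pair_count (shoes skirts : List Int) (price p sh : Int) :
    (pvBsearch (PySem.List.sorted (shoes.flatMap (fun c => skirts.map (fun k => c + k))) (fun v => v) false)
        (price - p - sh) 0
        (PySem.List.sorted (shoes.flatMap (fun c => skirts.map (fun k => c + k))) (fun v => v) false).length : Int)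
      = (shoes.map (fun c => (skirts.countP (fun k => decide (p + sh + c + k ≤ price)) : Int))).sum := by
  set raw := shoes.flatMap (fun c => skirts.map (fun k => c + k)) with hraw
  set cd := PySem.List.sorted raw (fun v => v) false with hcd
  have hpw : cd.Pairwise (fun a b => a ≤ b) := by
    have := PySem.List.sorted_pairwise raw (fun v => v)
    simpa using this
  have hb : pvBsearch cd (price - p - sh) 0 cd.length
      = cd.countP (fun v => decide (v ≤ price - p - sh)) :=
    pvBsearch_eq_countP cd (price - p - sh) hpw
  rw [hb]
  have hperm : cd.Perm raw := PySem.List.sorted_perm raw (fun v => v) false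
  rw [hperm.countP_eq]
  rw [countP_flatMap_sum]
  have hcongr : ∀ c : Int, skirts.countP (fun k => decide (c + k ≤ price - p - sh))
      = skirts.countP (fun k => decide (p + sh + c + k ≤ price)) := by
    intro c
    apply List.countP_congr
    intro k _
    simp only [decide_eq_true_eq]
    omega
  rw [Nat.cast_inj.mpr (by
    apply congrArg
    apply List.map_congr_left
    intro c _
    exact hcongr c)]
  push_cast
  rw [List.map_map]
  rfl

-- ===== VERDICT (by name: the statement is the Claim_ definition above) =====
theorem possible_combinations_spec : Claim_equal_possible_combinations := by
  intro pants shirts shoes skirts price _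
  unfold Spec_possible_combinations possible_combinations possible_combinations_alt
  simp only [inner_count, PySem.List.foldl_add, pair_count]
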